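-- pv_equiv track=rewrite | github.com/tbrooks2706/Everything | AoC-2021/Day_3.py | compile_binaries
-- ===== SOURCE A (Python) =====
-- class Column:
--     def __init__(self, input_list, index) -> None:
--         self.input_list = input_list
--         self.index = index
--         self.column = self.create_column()
--         if self.column.count("0") > self.column.count("1"):
--             self.gamma = "0"
--             self.epsilon = "1"
--         else:
--             self.gamma = "1"
--             self.epsilon = "0"
--
--     def create_column(self):
--         column = ""
--         for item in self.input_list:
--             column += item[self.index]
--         return column
--
-- def compile_binaries(input_list):
--     gamma = ""
--     epsilon = ""
--     for num in range(len(input_list[0])):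
--         this_column = Column(input_list, num)
--         gamma += this_column.gamma
--         epsilon += this_column.epsilon
--     return [gamma, epsilon]
-- ===== SOURCE B (Python) =====
-- def compile_binaries(input_list):
--     n = len(input_list[0])
--     zeros = [0] * n
--     ones = [0] * n
--     for row in input_list:
--         for i in range(n):
--             c = row[i]
--             if c == '0':
--                 zeros[i] += 1
--             elif c == '1':
--                 ones[i] += 1
--     gamma = ''.join('0' if zeros[i] > ones[i] else '1' for i in range(n))
--     epsilon = ''.join('1' if zeros[i] > ones[i] else '0' for i in range(n))
--     return [gamma, epsilon]
-- ===== Notes on version B (the rewrite author's own statement) =====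
-- stated objective: simpler
-- what changed: Replaces the per-column Column class (which re-scans all rows to build a column string and counts substrings for each bit position) with one row-major counting pass into zeros/ones arrays followed by a direct char-by-char build of gamma and epsilon.
import Mathlib
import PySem

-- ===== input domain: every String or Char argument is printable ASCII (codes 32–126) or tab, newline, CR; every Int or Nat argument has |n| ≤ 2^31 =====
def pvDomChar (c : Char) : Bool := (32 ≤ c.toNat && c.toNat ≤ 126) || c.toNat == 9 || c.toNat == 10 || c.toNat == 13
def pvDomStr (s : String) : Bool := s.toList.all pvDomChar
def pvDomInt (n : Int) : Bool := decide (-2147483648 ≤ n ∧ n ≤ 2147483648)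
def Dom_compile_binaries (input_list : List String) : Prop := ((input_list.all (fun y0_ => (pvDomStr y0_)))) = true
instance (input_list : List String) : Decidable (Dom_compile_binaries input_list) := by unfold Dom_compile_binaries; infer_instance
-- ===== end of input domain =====

-- B replaces A's per-column Column class by one row-major counting pass (objective: simpler).

-- ===== PORT A =====
-- Column.create_column: builds the column string; item[self.index] is PySem.Str.pyGet?
-- (the IndexError case, pyGet? = none, is excluded by Pre_; the default ' ' is never read there).
def pvCreateColumn (input_list : List String) (index : Int) : List Char :=
  input_list.foldl (fun column item => column ++ [(PySem.Str.pyGet? item index).getD ' ']) []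

-- Column.__init__: (gamma, epsilon) of one column; "0"-substring count of a 1-char needle
def pvColumnGE (input_list : List String) (index : Int) : Char × Char :=
  let column := pvCreateColumn input_list index
  if PySem.Chars.count column ['0'] > PySem.Chars.count column ['1'] then ('0', '1') else ('1', '0')

def compile_binaries (input_list : List String) : List String :=
  -- input_list[0] (IndexError on [] excluded by Pre_)
  let first := (PySem.List.pyGet? input_list 0).getD ""
  let ge := (PySem.List.pyRange 0 (PySem.Str.len first)).foldl
    (fun (ge : List Char × List Char) num =>
      let c := pvColumnGE input_list num
      (ge.1 ++ [c.1], ge.2 ++ [c.2])) ([], [])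
  [String.ofList ge.1, String.ofList ge.2]

-- ===== PORT B =====
def compile_binaries_alt (input_list : List String) : List String :=
  let first := (PySem.List.pyGet? input_list 0).getD ""   -- input_list[0]
  let n := (PySem.Str.len first).toNat                     -- n = len(input_list[0]) ≥ 0, so range(n) = List.range n
  let counts := input_list.foldl
    (fun (zo : List Int × List Int) row =>
      (List.range n).foldl
        (fun (zo : List Int × List Int) (i : Nat) =>
          let c := (PySem.Str.pyGet? row (i : Int)).getD ' '   -- row[i]; none excluded by Pre_
          if c = '0' then (zo.1.modify i (· + 1), zo.2)
          else if c = '1' then (zo.1, zo.2.modify i (· + 1))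
          else zo) zo)
    (List.replicate n (0 : Int), List.replicate n (0 : Int))
  let gamma := (List.range n).map (fun i => if counts.1[i]! > counts.2[i]! then '0' else '1')
  let epsilon := (List.range n).map (fun i => if counts.1[i]! > counts.2[i]! then '1' else '0')
  [String.ofList gamma, String.ofList epsilon]

-- ===== PRECONDITION & SPEC =====
-- Pre_: exactly where Python A returns — a nonempty list whose rows are at least as long as row 0
-- (otherwise input_list[0] or item[index] raises IndexError).
def Pre_compile_binaries (input_list : List String) : Prop :=
  input_list ≠ [] ∧ ∀ s ∈ input_list, (input_list.headD "").toList.length ≤ s.toList.length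
instance (input_list : List String) : Decidable (Pre_compile_binaries input_list) := by
  unfold Pre_compile_binaries; infer_instance
def pvWitness_compile_binaries : List String := ["01", "10", "11"]

def Spec_compile_binaries (input_list : List String) (out : List String) : Prop := out = compile_binaries_alt input_list
instance (input_list : List String) (out : List String) : Decidable (Spec_compile_binaries input_list out) := by unfold Spec_compile_binaries; infer_instance

-- ===== CLAIM (what is proved, stated in full; the proofs are below) =====
def Claim_equal_compile_binaries : Prop := ∀ (input_list : List String), Dom_compile_binaries input_list → Pre_compile_binaries input_list → Spec_compile_binaries input_list (compile_binaries input_list)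

-- ===== LEMMAS AND PROOFS =====

-- str.count with a single-character needle is the character count
lemma pvCountGo_singleton (c : Char) : ∀ (fuel : Nat) (s : List Char) (acc : Nat),
    s.length ≤ fuel → PySem.Chars.count.go [c] fuel s acc = acc + s.count c := by
  intro fuel
  induction fuel with
  | zero =>
    intro s acc h
    have hs : s = [] := List.eq_nil_of_length_eq_zero (Nat.le_zero.mp h)
    subst hs; simp [PySem.Chars.count.go]
  | succ m ih =>
    intro s acc h
    cases s with
    | nil => simp [PySem.Chars.count.go]
    | cons x t =>
      simp only [PySem.Chars.count.go, List.isPrefixOf, Bool.and_true]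
      by_cases hx : c = x
      · subst hx
        simp only [BEq.rfl, if_pos, List.length_cons, List.length_nil, Nat.zero_add, List.drop_one,
          List.tail_cons]
        rw [ih t (acc + 1) (by simpa using h)]
        simp; omega
      · have hbeq : (c == x) = false := by simpa using hx
        rw [if_neg (by simp [hbeq])]
        rw [ih t acc (by simpa using Nat.succ_le_succ_iff.mp (by simpa using h))]
        simp only [List.count_cons]
        have : ¬ (x == c) = true := by simp; intro hxc; exact hx hxc.symm
        simp [this]

lemma pvCount_singleton (s : List Char) (c : Char) : PySem.Chars.count s [c] = s.count c := by
  simpa using pvCountGo_singleton c s.length s 0 le_rfl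

-- the char B reads at row/column (the common column abbreviation of both proofs)
def pvPC (row : String) (j : Nat) : Char := (PySem.Str.pyGet? row (j : Int)).getD ' '

-- B's inner loop over range n touches index i of exactly one of the two count arrays
lemma pvInner (row : String) (z o : List Int) : ∀ (m j : Nat),
    (((List.range m).foldl (fun (zo : List Int × List Int) (i : Nat) =>
        if (PySem.Str.pyGet? row (i : Int)).getD ' ' = '0' then (zo.1.modify i (· + 1), zo.2)
        else if (PySem.Str.pyGet? row (i : Int)).getD ' ' = '1' then (zo.1, zo.2.modify i (· + 1))
        else zo) (z, o)).1[j]? =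
      if j < m ∧ pvPC row j = '0' then z[j]?.map (· + 1) else z[j]?) ∧
    (((List.range m).foldl (fun (zo : List Int × List Int) (i : Nat) =>
        if (PySem.Str.pyGet? row (i : Int)).getD ' ' = '0' then (zo.1.modify i (· + 1), zo.2)
        else if (PySem.Str.pyGet? row (i : Int)).getD ' ' = '1' then (zo.1, zo.2.modify i (· + 1))
        else zo) (z, o)).2[j]? =
      if j < m ∧ pvPC row j = '1' then o[j]?.map (· + 1) else o[j]?) := by
  intro m
  induction m with
  | zero => intro j; simp
  | succ m ih =>
    intro j
    obtain ⟨ih1, ih2⟩ := ih j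
    rw [List.range_succ]
    simp only [List.foldl_append, List.foldl_cons, List.foldl_nil]
    simp only [pvPC, PySem.Str.pyGet?_natCast] at ih1 ih2 ⊢
    by_cases h0 : row.toList[m]?.getD ' ' = '0'
    · rw [if_pos h0]
      refine ⟨?_, ?_⟩
      · rw [List.getElem?_modify, ih1]
        by_cases hmj : m = j
        · subst hmj; simp [h0]
        · by_cases hjm : j < m
          · simp [hmj, hjm, Nat.lt_succ_of_lt hjm]
          · simp [hmj, hjm, show ¬ j < m + 1 by omega]
      · rw [ih2]
        by_cases hjm : j < m
        · simp [hjm, Nat.lt_succ_of_lt hjm]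
        · by_cases hmj : j = m
          · subst hmj; simp [h0]
          · simp [hjm, show ¬ j < m + 1 by omega]
    · by_cases h1 : row.toList[m]?.getD ' ' = '1'
      · rw [if_neg h0, if_pos h1]
        refine ⟨?_, ?_⟩
        · rw [ih1]
          by_cases hjm : j < m
          · simp [hjm, Nat.lt_succ_of_lt hjm]
          · by_cases hmj : j = m
            · subst hmj; simp [h1]
            · simp [hjm, show ¬ j < m + 1 by omega]
        · rw [List.getElem?_modify, ih2]
          by_cases hmj : m = j
          · subst hmj; simp [h1]
          · by_cases hjm : j < m
            · simp [hmj, hjm, Nat.lt_succ_of_lt hjm]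
            · simp [hmj, hjm, show ¬ j < m + 1 by omega]
      · rw [if_neg h0, if_neg h1]
        refine ⟨?_, ?_⟩
        · rw [ih1]
          by_cases hjm : j < m
          · simp [hjm, Nat.lt_succ_of_lt hjm]
          · by_cases hmj : j = m
            · subst hmj; simp [h0]
            · simp [hjm, show ¬ j < m + 1 by omega]
        · rw [ih2]
          by_cases hjm : j < m
          · simp [hjm, Nat.lt_succ_of_lt hjm]
          · by_cases hmj : j = m
            · subst hmj; simp [h1]
            · simp [hjm, show ¬ j < m + 1 by omega]

-- folding B's counting pass over the rows accumulates the per-column character counts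
lemma pvOuter (n : Nat) : ∀ (rows : List String) (z o : List Int) (j : Nat),
    ((rows.foldl (fun (zo : List Int × List Int) row =>
        (List.range n).foldl (fun (zo : List Int × List Int) (i : Nat) =>
          if (PySem.Str.pyGet? row (i : Int)).getD ' ' = '0' then (zo.1.modify i (· + 1), zo.2)
          else if (PySem.Str.pyGet? row (i : Int)).getD ' ' = '1' then (zo.1, zo.2.modify i (· + 1))
          else zo) zo) (z, o)).1[j]? =
      if j < n then z[j]?.map (· + ((rows.map (fun row => pvPC row j)).count '0' : Int)) else z[j]?) ∧
    ((rows.foldl (fun (zo : List Int × List Int) row =>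
        (List.range n).foldl (fun (zo : List Int × List Int) (i : Nat) =>
          if (PySem.Str.pyGet? row (i : Int)).getD ' ' = '0' then (zo.1.modify i (· + 1), zo.2)
          else if (PySem.Str.pyGet? row (i : Int)).getD ' ' = '1' then (zo.1, zo.2.modify i (· + 1))
          else zo) zo) (z, o)).2[j]? =
      if j < n then o[j]?.map (· + ((rows.map (fun row => pvPC row j)).count '1' : Int)) else o[j]?) := by
  intro rows
  induction rows with
  | nil =>
    intro z o j
    refine ⟨?_, ?_⟩ <;> simp only [List.foldl_nil, List.map_nil, List.count_nil, Nat.cast_zero]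
    · split_ifs <;> cases z[j]? <;> simp
    · split_ifs <;> cases o[j]? <;> simp
  | cons row rest ih =>
    intro z o j
    simp only [List.foldl_cons]
    obtain ⟨hP1, hP2⟩ := pvInner row z o n j
    obtain ⟨ih1, ih2⟩ :=
      ih ((List.range n).foldl (fun (zo : List Int × List Int) (i : Nat) =>
          if (PySem.Str.pyGet? row (i : Int)).getD ' ' = '0' then (zo.1.modify i (· + 1), zo.2)
          else if (PySem.Str.pyGet? row (i : Int)).getD ' ' = '1' then (zo.1, zo.2.modify i (· + 1))
          else zo) (z, o)).1
        ((List.range n).foldl (fun (zo : List Int × List Int) (i : Nat) =>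
          if (PySem.Str.pyGet? row (i : Int)).getD ' ' = '0' then (zo.1.modify i (· + 1), zo.2)
          else if (PySem.Str.pyGet? row (i : Int)).getD ' ' = '1' then (zo.1, zo.2.modify i (· + 1))
          else zo) (z, o)).2 j
    constructor
    · rw [show (rest.foldl (fun (zo : List Int × List Int) row =>
          (List.range n).foldl (fun (zo : List Int × List Int) (i : Nat) =>
            if (PySem.Str.pyGet? row (i : Int)).getD ' ' = '0' then (zo.1.modify i (· + 1), zo.2)
            else if (PySem.Str.pyGet? row (i : Int)).getD ' ' = '1' then (zo.1, zo.2.modify i (· + 1))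
            else zo) zo)
          ((List.range n).foldl (fun (zo : List Int × List Int) (i : Nat) =>
            if (PySem.Str.pyGet? row (i : Int)).getD ' ' = '0' then (zo.1.modify i (· + 1), zo.2)
            else if (PySem.Str.pyGet? row (i : Int)).getD ' ' = '1' then (zo.1, zo.2.modify i (· + 1))
            else zo) (z, o))) = (rest.foldl (fun (zo : List Int × List Int) row =>
          (List.range n).foldl (fun (zo : List Int × List Int) (i : Nat) =>
            if (PySem.Str.pyGet? row (i : Int)).getD ' ' = '0' then (zo.1.modify i (· + 1), zo.2)
            else if (PySem.Str.pyGet? row (i : Int)).getD ' ' = '1' then (zo.1, zo.2.modify i (· + 1))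
            else zo) zo)
          (((List.range n).foldl (fun (zo : List Int × List Int) (i : Nat) =>
            if (PySem.Str.pyGet? row (i : Int)).getD ' ' = '0' then (zo.1.modify i (· + 1), zo.2)
            else if (PySem.Str.pyGet? row (i : Int)).getD ' ' = '1' then (zo.1, zo.2.modify i (· + 1))
            else zo) (z, o)).1,
           ((List.range n).foldl (fun (zo : List Int × List Int) (i : Nat) =>
            if (PySem.Str.pyGet? row (i : Int)).getD ' ' = '0' then (zo.1.modify i (· + 1), zo.2)
            else if (PySem.Str.pyGet? row (i : Int)).getD ' ' = '1' then (zo.1, zo.2.modify i (· + 1))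
            else zo) (z, o)).2)) from rfl, ih1, hP1]
      by_cases hj : j < n
      · rw [if_pos hj, if_pos hj]
        simp only [List.map_cons, List.count_cons]
        by_cases hc : pvPC row j = '0'
        · rw [if_pos ⟨hj, hc⟩]
          cases z[j]? <;> simp [hc, add_assoc, add_comm]
        · rw [if_neg (by tauto)]
          have : ¬ (pvPC row j == '0') = true := by simpa using hc
          cases z[j]? <;> simp [this]
      · rw [if_neg hj, if_neg hj, if_neg (by tauto)]
    · rw [show (rest.foldl (fun (zo : List Int × List Int) row =>
          (List.range n).foldl (fun (zo : List Int × List Int) (i : Nat) =>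
            if (PySem.Str.pyGet? row (i : Int)).getD ' ' = '0' then (zo.1.modify i (· + 1), zo.2)
            else if (PySem.Str.pyGet? row (i : Int)).getD ' ' = '1' then (zo.1, zo.2.modify i (· + 1))
            else zo) zo)
          ((List.range n).foldl (fun (zo : List Int × List Int) (i : Nat) =>
            if (PySem.Str.pyGet? row (i : Int)).getD ' ' = '0' then (zo.1.modify i (· + 1), zo.2)
            else if (PySem.Str.pyGet? row (i : Int)).getD ' ' = '1' then (zo.1, zo.2.modify i (· + 1))
            else zo) (z, o))) = (rest.foldl (fun (zo : List Int × List Int) row =>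
          (List.range n).foldl (fun (zo : List Int × List Int) (i : Nat) =>
            if (PySem.Str.pyGet? row (i : Int)).getD ' ' = '0' then (zo.1.modify i (· + 1), zo.2)
            else if (PySem.Str.pyGet? row (i : Int)).getD ' ' = '1' then (zo.1, zo.2.modify i (· + 1))
            else zo) zo)
          (((List.range n).foldl (fun (zo : List Int × List Int) (i : Nat) =>
            if (PySem.Str.pyGet? row (i : Int)).getD ' ' = '0' then (zo.1.modify i (· + 1), zo.2)
            else if (PySem.Str.pyGet? row (i : Int)).getD ' ' = '1' then (zo.1, zo.2.modify i (· + 1))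
            else zo) (z, o)).1,
           ((List.range n).foldl (fun (zo : List Int × List Int) (i : Nat) =>
            if (PySem.Str.pyGet? row (i : Int)).getD ' ' = '0' then (zo.1.modify i (· + 1), zo.2)
            else if (PySem.Str.pyGet? row (i : Int)).getD ' ' = '1' then (zo.1, zo.2.modify i (· + 1))
            else zo) (z, o)).2)) from rfl, ih2, hP2]
      by_cases hj : j < n
      · rw [if_pos hj, if_pos hj]
        simp only [List.map_cons, List.count_cons]
        by_cases hc : pvPC row j = '1'
        · rw [if_pos ⟨hj, hc⟩]
          cases o[j]? <;> simp [hc, add_assoc, add_comm]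
        · rw [if_neg (by tauto)]
          have : ¬ (pvPC row j == '1') = true := by simpa using hc
          cases o[j]? <;> simp [this]
      · rw [if_neg hj, if_neg hj, if_neg (by tauto)]

-- A's Column at bit position i, expressed through the column character counts
lemma pvA_elem (rows : List String) (i : Nat) :
    pvColumnGE rows (i : Int) =
      if (rows.map (fun row => pvPC row i)).count '0' > (rows.map (fun row => pvPC row i)).count '1'
      then ('0', '1') else ('1', '0') := by
  unfold pvColumnGE pvCreateColumn
  rw [PySem.List.foldl_append_singleton_eq_map]
  simp only [List.nil_append, pvCount_singleton, pvPC]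
  rfl

theorem pvMain (rows : List String) : compile_binaries rows = compile_binaries_alt rows := by
  unfold compile_binaries compile_binaries_alt
  simp only [PySem.Str.len_eq, Int.toNat_natCast]
  rw [PySem.List.pyRange_zero_natCast, List.foldl_map]
  rw [PySem.List.foldl_prod_mk
    (fun (a : List Char) (e : Nat) => a ++ [(pvColumnGE rows (e : Int)).1])
    (fun (b : List Char) (e : Nat) => b ++ [(pvColumnGE rows (e : Int)).2])]
  rw [PySem.List.foldl_append_singleton_eq_map, PySem.List.foldl_append_singleton_eq_map]
  simp only [List.nil_append, List.cons.injEq, and_true]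
  constructor <;>
  · refine congrArg String.ofList (List.map_congr_left ?_)
    intro i hi
    have hi' : i < ((PySem.List.pyGet? rows 0).getD "").toList.length := List.mem_range.mp hi
    obtain ⟨h1, h2⟩ := pvOuter (((PySem.List.pyGet? rows 0).getD "").toList.length) rows
      (List.replicate (((PySem.List.pyGet? rows 0).getD "").toList.length) (0 : Int))
      (List.replicate (((PySem.List.pyGet? rows 0).getD "").toList.length) (0 : Int)) i
    rw [if_pos hi', List.getElem?_replicate, if_pos hi'] at h1 h2
    rw [pvA_elem rows i]
    simp only [List.getElem!_eq_getElem?_getD, h1, h2, Option.map_some, Option.getD_some]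
    have hiff : ((0 : Int) + ((rows.map (fun row => pvPC row i)).count '0' : Int) >
        (0 : Int) + ((rows.map (fun row => pvPC row i)).count '1' : Int)) ↔
        ((rows.map (fun row => pvPC row i)).count '0' > (rows.map (fun row => pvPC row i)).count '1') := by
      omega
    simp only [hiff]
    split_ifs <;> rfl

-- ===== VERDICT (by name: the statement is the Claim_ definition above) =====
theorem compile_binaries_spec : Claim_equal_compile_binaries := by
  intro rows _ _
  unfold Spec_compile_binaries
  exact pvMain rows
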